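-- pv_equiv track=rewrite | github.com/Jebel-Quant/rhiza-cli | src/rhiza/models/lock.py | _bare_keys_to_explicit
-- ===== SOURCE A (Python) =====
-- def _bare_keys_to_explicit(yaml_str: str) -> str:
--     """Convert bare mapping-key lines inside the ``files:`` tree to YAML explicit-key notation.
--
--     After :class:`_LockDumper` serialises ``None`` values, file leaf nodes in the
--     ``files`` tree appear as ``key:`` with no trailing content.  This
--     post-processor replaces those lines with ``? key`` — valid YAML explicit-key
--     syntax that carries no colon after the file name — while leaving all other
--     fields (``include:``, ``sha:``, etc.) completely unchanged.
--
--     Only lines that are more deeply indented than the ``files:`` key itself are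
--     considered, which avoids accidentally converting unrelated top-level keys.
--
--     ``yaml.safe_load`` reads ``? key`` back as ``{key: None}``, which
--     :func:`_flatten_tree` handles correctly.
--
--     Args:
--         yaml_str: YAML text produced by :class:`_LockDumper`.
--
--     Returns:
--         YAML text with file-leaf lines inside ``files:`` rewritten as ``? key``.
--     """
--     lines = yaml_str.splitlines(keepends=True)
--     n = len(lines)
--     result = []
--
--     # Locate the 'files:' key so we only touch lines inside its block.
--     files_indent: int | None = None
--     in_files = False
--
--     for i, line in enumerate(lines):
--         rstripped = line.rstrip("\n\r").rstrip()
--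
--         # Detect the start of the files: block.
--         if not in_files:
--             if rstripped == "files:" or rstripped.startswith("files: "):
--                 files_indent = len(rstripped) - len(rstripped.lstrip())
--                 in_files = True
--             result.append(line)
--             continue
--
--         # If we encounter a non-empty line at the same depth as 'files:' (or
--         # shallower), the files block has ended.
--         if line.strip() and (len(line) - len(line.lstrip())) <= files_indent:  # type: ignore[operator]
--             in_files = False
--             result.append(line)
--             continue
--
--         # Only convert non-empty lines ending with ':' and no inline value.
--         if rstripped.endswith(":") and ": " not in rstripped and rstripped.strip():
--             current_indent = len(rstripped) - len(rstripped.lstrip())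
--             # A line is a leaf if no following non-empty line is more indented.
--             is_leaf = True
--             for j in range(i + 1, n):
--                 next_line = lines[j].rstrip("\n\r")
--                 if next_line.strip():
--                     if len(next_line) - len(next_line.lstrip()) > current_indent:
--                         is_leaf = False
--                     break
--             if is_leaf:
--                 key = rstripped.lstrip().rstrip(":")
--                 result.append(" " * current_indent + "? " + key + "\n")
--                 continue
--
--         result.append(line)
--
--     return "".join(result)
-- ===== SOURCE B (Python) =====
-- def _bare_keys_to_explicit(yaml_str: str) -> str:
--     """Staged rewrite: a backward pass precomputes the indent of the nearest
--     following non-empty line, then a fold with an explicit Optional[int] state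
--     (files_indent when inside the files block, None otherwise) renders each
--     line with pure step/render helpers instead of rescanning the tail."""
--     lines = yaml_str.splitlines(keepends=True)
--
--     nxt = []
--     follow = None
--     for line in reversed(lines):
--         nxt.append(follow)
--         core = line.rstrip("\n\r")
--         if core.strip():
--             follow = len(core) - len(core.lstrip())
--     nxt.reverse()
--
--     def step(state, line):
--         core = line.rstrip("\n\r").rstrip()
--         if state is None:
--             if core == "files:" or core.startswith("files: "):
--                 return len(core) - len(core.lstrip())
--             return None
--         if line.strip() and len(line) - len(line.lstrip()) <= state:
--             return None
--         return state
--
--     def render(state, line, follow):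
--         if state is None:
--             return line
--         if line.strip() and len(line) - len(line.lstrip()) <= state:
--             return line
--         core = line.rstrip("\n\r").rstrip()
--         if core.endswith(":") and ": " not in core and core.strip():
--             cur = len(core) - len(core.lstrip())
--             if follow is None or follow <= cur:
--                 return " " * cur + "? " + core.lstrip().rstrip(":") + "\n"
--         return line
--
--     out = []
--     state = None
--     for line, follow in zip(lines, nxt):
--         out.append(render(state, line, follow))
--         state = step(state, line)
--     return "".join(out)
-- ===== Notes on version B (the rewrite author's own statement) =====
-- stated objective: alternative
-- what changed: A decides each candidate leaf by rescanning the whole tail and threads a bool+int loop state; B precomputes in a backward pass the indent of the nearest following non-empty line and then folds once over the zipped lines with a single Optional state and pure step/render helpers.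
import Mathlib
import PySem

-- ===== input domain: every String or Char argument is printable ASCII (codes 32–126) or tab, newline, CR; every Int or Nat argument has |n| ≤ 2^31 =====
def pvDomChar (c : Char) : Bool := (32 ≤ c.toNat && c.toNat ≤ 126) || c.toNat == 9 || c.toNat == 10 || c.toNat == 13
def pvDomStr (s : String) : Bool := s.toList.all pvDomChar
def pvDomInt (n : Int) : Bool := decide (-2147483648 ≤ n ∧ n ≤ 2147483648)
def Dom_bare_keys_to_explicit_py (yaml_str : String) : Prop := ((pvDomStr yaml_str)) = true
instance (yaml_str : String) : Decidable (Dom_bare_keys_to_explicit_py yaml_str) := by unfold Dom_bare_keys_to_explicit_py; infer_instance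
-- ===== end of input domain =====

-- B replaces A's per-candidate tail rescan and twin boolean/int loop state by staged passes:
-- a backward precomputation of the nearest following non-empty indent, then a fold with one
-- Optional state and pure step/render helpers (objective: alternative algorithm).

-- ===== shared string primitives (both Pythons call the same built-ins) =====
-- hand port of s.rstrip(chars): drop trailing characters belonging to `chars`; exact on all inputs
def pvRstripChars (cs chars : List Char) : List Char :=
  (cs.reverse.dropWhile (chars.contains ·)).reverse

-- line.rstrip("\n\r")
def pvRstripNL (l : List Char) : List Char := pvRstripChars l ['\n', '\r']

-- len(s) - len(s.lstrip())
def pvIndent (l : List Char) : Nat := l.length - (PySem.Chars.lstrip l).length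

-- hand port of str.splitlines(keepends=True); exact on the ASCII domain (line ends \n, \r, \r\n)
def pvSplitK (acc : List Char) : List Char → List (List Char)
  | [] => if acc = [] then [] else [acc.reverse]
  | '\r' :: '\n' :: rest => (acc.reverse ++ ['\r', '\n']) :: pvSplitK [] rest
  | '\n' :: rest => (acc.reverse ++ ['\n']) :: pvSplitK [] rest
  | '\r' :: rest => (acc.reverse ++ ['\r']) :: pvSplitK [] rest
  | c :: rest => pvSplitK (c :: acc) rest

-- ===== PORT A =====
-- A's inner scan: for j in range(i+1, n): first non-empty following line decides leaf-ness
def pvIsLeaf (cur : Nat) : List (List Char) → Bool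
  | [] => true
  | l :: ls =>
    let nl := pvRstripNL l
    if PySem.Chars.strip nl ≠ [] then decide (pvIndent nl ≤ cur) else pvIsLeaf cur ls

-- A's main loop; files_indent starts at 0 (Python's None) — it is only read once in_files is set
def pvAgo : Bool → Nat → List (List Char) → List (List Char)
  | _, _, [] => []
  | false, fInd, line :: rest =>
    -- `if not in_files:` branch of A's loop
    let rstripped := PySem.Chars.rstrip (pvRstripNL line)
    if rstripped = "files:".toList ∨ PySem.Chars.startswith rstripped "files: ".toList then
      line :: pvAgo true (pvIndent rstripped) rest
    else
      line :: pvAgo false fInd rest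
  | true, fInd, line :: rest =>
    let rstripped := PySem.Chars.rstrip (pvRstripNL line)
    if PySem.Chars.strip line ≠ [] ∧ pvIndent line ≤ fInd then
      line :: pvAgo false fInd rest
    else if PySem.Chars.endswith rstripped [':'] ∧ PySem.Chars.isIn [':', ' '] rstripped = false
        ∧ PySem.Chars.strip rstripped ≠ [] then
      let cur := pvIndent rstripped
      if pvIsLeaf cur rest then
        (List.replicate cur ' ' ++ ['?', ' '] ++ pvRstripChars (PySem.Chars.lstrip rstripped) [':'] ++ ['\n'])
          :: pvAgo true fInd rest
      else
        line :: pvAgo true fInd rest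
    else
      line :: pvAgo true fInd rest

def bare_keys_to_explicit_py (yaml_str : String) : String :=
  String.ofList (pvAgo false 0 (pvSplitK [] yaml_str.toList)).flatten

-- ===== PORT B =====
-- backward pass (Source B's `for line in reversed(lines)` loop): returns (follow, nxt)
-- after processing the given suffix
def pvNextsAux : List (List Char) → Option Nat × List (Option Nat)
  | [] => (none, [])
  | l :: ls =>
    let p := pvNextsAux ls
    let core := pvRstripNL l
    ((if PySem.Chars.strip core ≠ [] then some (pvIndent core) else p.1), p.1 :: p.2)

def pvNexts (ls : List (List Char)) : List (Option Nat) := (pvNextsAux ls).2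

-- Source B's `step(state, line)`: state is files_indent inside the files block, none outside
def pvStep (state : Option Nat) (line : List Char) : Option Nat :=
  match state with
  | none =>
    let core := PySem.Chars.rstrip (pvRstripNL line)
    if core = "files:".toList ∨ PySem.Chars.startswith core "files: ".toList then
      some (pvIndent core)
    else none
  | some k =>
    if PySem.Chars.strip line ≠ [] ∧ pvIndent line ≤ k then none else some k

-- Source B's `render(state, line, follow)`
def pvRender (state : Option Nat) (line : List Char) (follow : Option Nat) : List Char :=
  match state with
  | none => line
  | some k =>
    if PySem.Chars.strip line ≠ [] ∧ pvIndent line ≤ k then line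
    else
      let core := PySem.Chars.rstrip (pvRstripNL line)
      if PySem.Chars.endswith core [':'] ∧ PySem.Chars.isIn [':', ' '] core = false
          ∧ PySem.Chars.strip core ≠ [] then
        let cur := pvIndent core
        -- `follow is None or follow <= cur`
        if (match follow with | none => true | some i => decide (i ≤ cur)) then
          List.replicate cur ' ' ++ ['?', ' '] ++ pvRstripChars (PySem.Chars.lstrip core) [':'] ++ ['\n']
        else line
      else line

def bare_keys_to_explicit_py_alt (yaml_str : String) : String :=
  String.ofList
    (((pvSplitK [] yaml_str.toList).zip (pvNexts (pvSplitK [] yaml_str.toList))).foldl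
      (fun (st : Option Nat × List (List Char)) p =>
        (pvStep st.1 p.1, pvRender st.1 p.1 p.2 :: st.2)) (none, [])).2.reverse.flatten

-- ===== PRECONDITION & SPEC =====
def Spec_bare_keys_to_explicit_py (yaml_str : String) (out : String) : Prop := out = bare_keys_to_explicit_py_alt yaml_str
instance (yaml_str : String) (out : String) : Decidable (Spec_bare_keys_to_explicit_py yaml_str out) := by unfold Spec_bare_keys_to_explicit_py; infer_instance

-- ===== CLAIM (what is proved, stated in full; the proofs are below) =====
def Claim_equal_bare_keys_to_explicit_py : Prop := ∀ (yaml_str : String), Dom_bare_keys_to_explicit_py yaml_str → Spec_bare_keys_to_explicit_py yaml_str (bare_keys_to_explicit_py yaml_str)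

-- ===== LEMMAS AND PROOFS =====

-- recursion computing what B's foldl produces (proof helper only)
def pvRun (st : Option Nat) : List (List Char × Option Nat) → List (List Char)
  | [] => []
  | p :: ps => pvRender st p.1 p.2 :: pvRun (pvStep st p.1) ps

theorem pvFoldl_run (ps : List (List Char × Option Nat)) :
    ∀ (st : Option Nat) (acc : List (List Char)),
    (ps.foldl (fun (st : Option Nat × List (List Char)) p =>
      (pvStep st.1 p.1, pvRender st.1 p.1 p.2 :: st.2)) (st, acc)).2.reverse
      = acc.reverse ++ pvRun st ps := by
  induction ps with
  | nil => intro st acc; simp [pvRun]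
  | cons p ps ih => intro st acc; simp [List.foldl, pvRun, ih]

-- A's tail rescan computes exactly B's precomputed nearest-following-non-empty indent test
theorem pvIsLeaf_eq (ls : List (List Char)) (cur : Nat) :
    pvIsLeaf cur ls = (match (pvNextsAux ls).1 with
      | none => true | some i => decide (i ≤ cur)) := by
  induction ls with
  | nil => rfl
  | cons l ls ih =>
    simp only [pvIsLeaf, pvNextsAux]
    split_ifs with h
    · rfl
    · exact ih

theorem pvNexts_cons (l : List Char) (ls : List (List Char)) :
    pvNexts (l :: ls) = (pvNextsAux ls).1 :: pvNexts ls := rfl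

-- B's single-state staged run agrees with A's twin-state recursion (fInd is dead when st = none)
theorem pvRun_eq_pvAgo (ls : List (List Char)) :
    ∀ (st : Option Nat) (fInd : Nat), (∀ k, st = some k → fInd = k) →
    pvRun st (ls.zip (pvNexts ls)) = pvAgo st.isSome fInd ls := by
  induction ls with
  | nil => intro st fInd _; cases st <;> rfl
  | cons l ls ih =>
    intro st fInd h
    rw [pvNexts_cons, List.zip_cons_cons]
    cases st with
    | none =>
      simp only [pvRun, pvRender, pvStep, pvAgo, Option.isSome_none]
      split_ifs with hc
      · rw [ih (some (pvIndent (PySem.Chars.rstrip (pvRstripNL l)))) _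
          (by intro j hj; injection hj)] <;> rfl
      · rw [ih none fInd (by intro j hj; cases hj)] <;> rfl
    | some k =>
      rw [h k rfl]
      simp only [pvRun, pvRender, pvStep, pvAgo, Option.isSome_some, pvIsLeaf_eq]
      split_ifs <;>
        first
        | (rw [ih none k (by intro j hj; cases hj)] <;> rfl)
        | (rw [ih (some k) k (by intro j hj; injection hj)] <;> rfl)

-- ===== VERDICT (by name: the statement is the Claim_ definition above) =====
theorem bare_keys_to_explicit_py_spec : Claim_equal_bare_keys_to_explicit_py := by
  intro yaml_str _
  unfold Spec_bare_keys_to_explicit_py bare_keys_to_explicit_py bare_keys_to_explicit_py_alt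
  rw [pvFoldl_run, List.reverse_nil, List.nil_append,
    pvRun_eq_pvAgo _ none 0 (by intro k hk; cases hk)]
  rfl
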